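-- pv_equiv track=rewrite | github.com/TrueV1sion/ai-roadtrip-storyteller | archive/failed-attempts/mvp-iterations/mvp_voice_enhanced.py | determine_location_type
-- ===== SOURCE A (Python) =====
-- def determine_location_type(destination: str) -> str:
--     """Determine the type of location from destination name"""
--     destination_lower = destination.lower()
--
--     if any(word in destination_lower for word in ["bridge", "golden gate", "brooklyn"]):
--         return "landmark"
--     elif any(word in destination_lower for word in ["park", "garden", "trail", "canyon", "mountain"]):
--         return "natural"
--     elif any(word in destination_lower for word in ["museum", "gallery", "theater"]):
--         return "cultural"
--     elif any(word in destination_lower for word in ["disney", "universal", "six flags"]):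
--         return "theme_park"
--     elif any(word in destination_lower for word in ["beach", "ocean", "coast"]):
--         return "coastal"
--     else:
--         return "general"
-- ===== SOURCE B (Python) =====
-- # Flat keyword table (alphabetical) mapping each keyword to (priority, label);
-- # single pass tracking the minimum-priority match instead of an elif chain.
-- KEYWORD_PRIORITY = {
--     "beach": (4, "coastal"),
--     "bridge": (0, "landmark"),
--     "brooklyn": (0, "landmark"),
--     "canyon": (1, "natural"),
--     "coast": (4, "coastal"),
--     "disney": (3, "theme_park"),
--     "gallery": (2, "cultural"),
--     "garden": (1, "natural"),
--     "golden gate": (0, "landmark"),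
--     "mountain": (1, "natural"),
--     "museum": (2, "cultural"),
--     "ocean": (4, "coastal"),
--     "park": (1, "natural"),
--     "six flags": (3, "theme_park"),
--     "theater": (2, "cultural"),
--     "trail": (1, "natural"),
--     "universal": (3, "theme_park"),
-- }
--
-- def determine_location_type(destination: str) -> str:
--     """Determine the type of location from destination name"""
--     destination_lower = destination.lower()
--     best = None
--     for kw, pl in KEYWORD_PRIORITY.items():
--         if kw in destination_lower and (best is None or pl[0] < best[0]):
--             best = pl
--     return best[1] if best is not None else "general"
-- ===== Notes on version B (the rewrite author's own statement) =====
-- stated objective: alternative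
-- what changed: Replaced the prioritized elif chain over keyword groups with a flat alphabetical keyword->(priority,label) table scanned once while tracking the minimum-priority match; the priority field, not scan order, decides ties.
import Mathlib
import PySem

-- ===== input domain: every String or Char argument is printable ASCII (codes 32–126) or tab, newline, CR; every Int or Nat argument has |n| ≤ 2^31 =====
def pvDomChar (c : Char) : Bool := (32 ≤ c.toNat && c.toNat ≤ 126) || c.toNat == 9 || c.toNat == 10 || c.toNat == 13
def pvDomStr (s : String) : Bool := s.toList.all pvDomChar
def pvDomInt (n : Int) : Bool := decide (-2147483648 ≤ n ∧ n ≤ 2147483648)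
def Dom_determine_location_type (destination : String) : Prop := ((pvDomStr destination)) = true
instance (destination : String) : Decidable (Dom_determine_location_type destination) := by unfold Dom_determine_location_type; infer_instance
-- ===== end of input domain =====

-- B replaces A's prioritized elif chain with one pass over a flat alphabetical
-- keyword→(priority,label) table, keeping the minimum-priority match (alternative; same cost).

-- ===== PORT A =====
def determine_location_type (destination : String) : String :=
  let destination_lower := PySem.Str.lower destination
  if ["bridge", "golden gate", "brooklyn"].any (fun word => PySem.Str.isIn word destination_lower) then
    "landmark"
  else if ["park", "garden", "trail", "canyon", "mountain"].any (fun word => PySem.Str.isIn word destination_lower) then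
    "natural"
  else if ["museum", "gallery", "theater"].any (fun word => PySem.Str.isIn word destination_lower) then
    "cultural"
  else if ["disney", "universal", "six flags"].any (fun word => PySem.Str.isIn word destination_lower) then
    "theme_park"
  else if ["beach", "ocean", "coast"].any (fun word => PySem.Str.isIn word destination_lower) then
    "coastal"
  else
    "general"

-- ===== PORT B =====
-- Source B's KEYWORD_PRIORITY dict (insertion = alphabetical order), as an association list
def pvKeywordPriority : List (String × Int × String) :=
  [("beach", (4, "coastal")),
   ("bridge", (0, "landmark")),
   ("brooklyn", (0, "landmark")),
   ("canyon", (1, "natural")),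
   ("coast", (4, "coastal")),
   ("disney", (3, "theme_park")),
   ("gallery", (2, "cultural")),
   ("garden", (1, "natural")),
   ("golden gate", (0, "landmark")),
   ("mountain", (1, "natural")),
   ("museum", (2, "cultural")),
   ("ocean", (4, "coastal")),
   ("park", (1, "natural")),
   ("six flags", (3, "theme_park")),
   ("theater", (2, "cultural")),
   ("trail", (1, "natural")),
   ("universal", (3, "theme_park"))]

-- Source B's loop body: keep `best` unless kw matches and (best is None or prio < best[0])
def pvStep (dl : String) (best : Option (Int × String)) (kv : String × Int × String) :
    Option (Int × String) :=
  if PySem.Str.isIn kv.1 dl &&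
      (match best with | none => true | some b => decide (kv.2.1 < b.1)) then
    some kv.2
  else
    best

def determine_location_type_alt (destination : String) : String :=
  let destination_lower := PySem.Str.lower destination
  match pvKeywordPriority.foldl (pvStep destination_lower) none with
  | some b => b.2
  | none => "general"

-- ===== PRECONDITION & SPEC =====
def Spec_determine_location_type (destination : String) (out : String) : Prop := out = determine_location_type_alt destination
instance (destination : String) (out : String) : Decidable (Spec_determine_location_type destination out) := by unfold Spec_determine_location_type; infer_instance

-- ===== CLAIM (what is proved, stated in full; the proofs are below) =====
def Claim_equal_determine_location_type : Prop := ∀ (destination : String), Dom_determine_location_type destination → Spec_determine_location_type destination (determine_location_type destination)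

-- ===== LEMMAS AND PROOFS =====

-- A's five group tests, named for the proof
def pvG1 (d : String) : Bool := ["bridge", "golden gate", "brooklyn"].any (fun w => PySem.Str.isIn w (PySem.Str.lower d))
def pvG2 (d : String) : Bool := ["park", "garden", "trail", "canyon", "mountain"].any (fun w => PySem.Str.isIn w (PySem.Str.lower d))
def pvG3 (d : String) : Bool := ["museum", "gallery", "theater"].any (fun w => PySem.Str.isIn w (PySem.Str.lower d))
def pvG4 (d : String) : Bool := ["disney", "universal", "six flags"].any (fun w => PySem.Str.isIn w (PySem.Str.lower d))
def pvG5 (d : String) : Bool := ["beach", "ocean", "coast"].any (fun w => PySem.Str.isIn w (PySem.Str.lower d))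

-- the (priority,label) pairs of the matched keywords, in table order
def pvMatches (d : String) : List (Int × String) :=
  (pvKeywordPriority.filter (fun kv => PySem.Str.isIn kv.1 (PySem.Str.lower d))).map Prod.snd

-- reference minimum-accumulator (what Source B's loop maintains)
def pvMinAcc (a : Option (Int × String)) : List (Int × String) → Option (Int × String)
  | [] => a
  | x :: xs => pvMinAcc (match a with
      | none => some x
      | some b => if x.1 < b.1 then some x else some b) xs

lemma pvMinAcc_nil (a : Option (Int × String)) : pvMinAcc a [] = a := rfl

lemma pvMinAcc_cons (a : Option (Int × String)) (x : Int × String) (xs : List (Int × String)) :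
    pvMinAcc a (x :: xs) =
      pvMinAcc (match a with
        | none => some x
        | some b => if x.1 < b.1 then some x else some b) xs := rfl

lemma foldl_pvStep (dl : String) (L : List (String × Int × String)) :
    ∀ (a : Option (Int × String)),
      L.foldl (pvStep dl) a =
        pvMinAcc a ((L.filter (fun kv => PySem.Str.isIn kv.1 dl)).map Prod.snd) := by
  induction L with
  | nil => intro a; rfl
  | cons kv L ih =>
      intro a
      cases hin : PySem.Str.isIn kv.1 dl with
      | true =>
          rw [List.foldl_cons, ih, List.filter_cons, if_pos hin, List.map_cons]
          rw [pvMinAcc_cons]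
          congr 1
          cases a with
          | none => unfold pvStep; rw [hin]; rfl
          | some b =>
              unfold pvStep; rw [hin]
              by_cases hlt : kv.2.1 < b.1 <;> simp [hlt]
      | false =>
          rw [List.foldl_cons, ih, List.filter_cons, if_neg (by rw [hin]; simp)]
          congr 1
          cases a with
          | none => unfold pvStep; rw [hin]; rfl
          | some b => unfold pvStep; rw [hin]; rfl

lemma mem_pvMatches (d : String) (x : Int × String) :
    x ∈ pvMatches d ↔
      (pvG1 d = true ∧ x = (0, "landmark")) ∨
      (pvG2 d = true ∧ x = (1, "natural")) ∨
      (pvG3 d = true ∧ x = (2, "cultural")) ∨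
      (pvG4 d = true ∧ x = (3, "theme_park")) ∨
      (pvG5 d = true ∧ x = (4, "coastal")) := by
  constructor
  · intro hx
    rcases List.mem_map.mp hx with ⟨t, ht, rfl⟩
    rcases List.mem_filter.mp ht with ⟨htm, hp⟩
    fin_cases htm <;> simp_all [pvG1, pvG2, pvG3, pvG4, pvG5]
  · intro h
    rcases h with ⟨hg, rfl⟩ | ⟨hg, rfl⟩ | ⟨hg, rfl⟩ | ⟨hg, rfl⟩ | ⟨hg, rfl⟩
    · simp [pvG1] at hg
      rcases hg with hp | hp | hp <;>
        simp [pvMatches, pvKeywordPriority, List.mem_map, List.mem_filter, hp]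
    · simp [pvG2] at hg
      rcases hg with hp | hp | hp | hp | hp <;>
        simp [pvMatches, pvKeywordPriority, List.mem_map, List.mem_filter, hp]
    · simp [pvG3] at hg
      rcases hg with hp | hp | hp <;>
        simp [pvMatches, pvKeywordPriority, List.mem_map, List.mem_filter, hp]
    · simp [pvG4] at hg
      rcases hg with hp | hp | hp <;>
        simp [pvMatches, pvKeywordPriority, List.mem_map, List.mem_filter, hp]
    · simp [pvG5] at hg
      rcases hg with hp | hp | hp <;>
        simp [pvMatches, pvKeywordPriority, List.mem_map, List.mem_filter, hp]

lemma pvMinAcc_eq_some (v : Int × String) :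
    ∀ (M : List (Int × String)) (a : Option (Int × String)),
      (v ∈ M ∨ a = some v) →
      (∀ x ∈ M, v.1 ≤ x.1 ∧ (x.1 = v.1 → x = v)) →
      (∀ b, a = some b → v.1 ≤ b.1 ∧ (b.1 = v.1 → b = v)) →
      pvMinAcc a M = some v := by
  intro M
  induction M with
  | nil =>
      intro a h1 _ _
      rcases h1 with h | h
      · exact absurd h (List.not_mem_nil)
      · rw [pvMinAcc_nil, h]
  | cons x xs ih =>
      intro a h1 h2 h3
      have hx := h2 x List.mem_cons_self
      rw [pvMinAcc_cons]
      cases a with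
      | none =>
          apply ih
          · rcases h1 with h | h
            · rcases List.mem_cons.mp h with h | h
              · subst h; right; rfl
              · left; exact h
            · cases h
          · intro y hy; exact h2 y (List.mem_cons_of_mem _ hy)
          · intro b hb
            injection hb with hb; subst hb; exact hx
      | some b =>
          have hb := h3 b rfl
          apply ih
          · rcases h1 with h | h
            · rcases List.mem_cons.mp h with h | h
              · subst h
                right
                by_cases hlt : v.1 < b.1
                · simp [hlt]
                · have hbx : b = v := hb.2 (le_antisymm (not_lt.mp hlt) hb.1)
                  simp [hbx]
              · left; exact h
            · injection h with h
              subst h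
              right
              have hnlt : ¬ x.1 < b.1 := not_lt.mpr hx.1
              simp [hnlt]
          · intro y hy; exact h2 y (List.mem_cons_of_mem _ hy)
          · intro c hc
            by_cases hlt : x.1 < b.1 <;> simp [hlt] at hc <;> subst hc
            · exact hx
            · exact hb

lemma alt_eq_minAcc (d : String) :
    determine_location_type_alt d =
      (match pvMinAcc none (pvMatches d) with
       | some b => b.2
       | none => "general") := by
  simp only [determine_location_type_alt]
  rw [foldl_pvStep]
  rfl

lemma alt_landmark (d : String) (h1 : pvG1 d = true) :
    determine_location_type_alt d = "landmark" := by
  rw [alt_eq_minAcc,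
      pvMinAcc_eq_some (0, "landmark") (pvMatches d) none
        (Or.inl ((mem_pvMatches d _).mpr (Or.inl ⟨h1, rfl⟩)))
        (by intro x hx
            rcases (mem_pvMatches d x).mp hx with ⟨_, h⟩ | ⟨_, h⟩ | ⟨_, h⟩ | ⟨_, h⟩ | ⟨_, h⟩ <;>
              subst h <;> exact ⟨by norm_num, by intro h; simp_all⟩)
        (by intro b hb; cases hb)]

lemma alt_natural (d : String) (h1 : pvG1 d = false) (h2 : pvG2 d = true) :
    determine_location_type_alt d = "natural" := by
  rw [alt_eq_minAcc,
      pvMinAcc_eq_some (1, "natural") (pvMatches d) none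
        (Or.inl ((mem_pvMatches d _).mpr (Or.inr (Or.inl ⟨h2, rfl⟩))))
        (by intro x hx
            rcases (mem_pvMatches d x).mp hx with ⟨hg, h⟩ | ⟨_, h⟩ | ⟨_, h⟩ | ⟨_, h⟩ | ⟨_, h⟩ <;>
              subst h <;> first
                | (exact absurd hg (by simp [h1]))
                | exact ⟨by norm_num, by intro h; simp_all⟩)
        (by intro b hb; cases hb)]

lemma alt_cultural (d : String) (h1 : pvG1 d = false) (h2 : pvG2 d = false)
    (h3 : pvG3 d = true) :
    determine_location_type_alt d = "cultural" := by
  rw [alt_eq_minAcc,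
      pvMinAcc_eq_some (2, "cultural") (pvMatches d) none
        (Or.inl ((mem_pvMatches d _).mpr (Or.inr (Or.inr (Or.inl ⟨h3, rfl⟩)))))
        (by intro x hx
            rcases (mem_pvMatches d x).mp hx with ⟨hg, h⟩ | ⟨hg, h⟩ | ⟨_, h⟩ | ⟨_, h⟩ | ⟨_, h⟩ <;>
              subst h <;> first
                | (exact absurd hg (by simp [h1, h2]))
                | exact ⟨by norm_num, by intro h; simp_all⟩)
        (by intro b hb; cases hb)]

lemma alt_theme_park (d : String) (h1 : pvG1 d = false) (h2 : pvG2 d = false)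
    (h3 : pvG3 d = false) (h4 : pvG4 d = true) :
    determine_location_type_alt d = "theme_park" := by
  rw [alt_eq_minAcc,
      pvMinAcc_eq_some (3, "theme_park") (pvMatches d) none
        (Or.inl ((mem_pvMatches d _).mpr (Or.inr (Or.inr (Or.inr (Or.inl ⟨h4, rfl⟩))))))
        (by intro x hx
            rcases (mem_pvMatches d x).mp hx with ⟨hg, h⟩ | ⟨hg, h⟩ | ⟨hg, h⟩ | ⟨_, h⟩ | ⟨_, h⟩ <;>
              subst h <;> first
                | (exact absurd hg (by simp [h1, h2, h3]))
                | exact ⟨by norm_num, by intro h; simp_all⟩)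
        (by intro b hb; cases hb)]

lemma alt_coastal (d : String) (h1 : pvG1 d = false) (h2 : pvG2 d = false)
    (h3 : pvG3 d = false) (h4 : pvG4 d = false) (h5 : pvG5 d = true) :
    determine_location_type_alt d = "coastal" := by
  rw [alt_eq_minAcc,
      pvMinAcc_eq_some (4, "coastal") (pvMatches d) none
        (Or.inl ((mem_pvMatches d _).mpr (Or.inr (Or.inr (Or.inr (Or.inr ⟨h5, rfl⟩))))))
        (by intro x hx
            rcases (mem_pvMatches d x).mp hx with ⟨hg, h⟩ | ⟨hg, h⟩ | ⟨hg, h⟩ | ⟨hg, h⟩ | ⟨_, h⟩ <;>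
              subst h <;> first
                | (exact absurd hg (by simp [h1, h2, h3, h4]))
                | exact ⟨by norm_num, by intro h; simp_all⟩)
        (by intro b hb; cases hb)]

lemma alt_general (d : String) (h1 : pvG1 d = false) (h2 : pvG2 d = false)
    (h3 : pvG3 d = false) (h4 : pvG4 d = false) (h5 : pvG5 d = false) :
    determine_location_type_alt d = "general" := by
  rw [alt_eq_minAcc]
  have hM : pvMatches d = [] := by
    apply List.eq_nil_iff_forall_not_mem.mpr
    intro x hx
    rcases (mem_pvMatches d x).mp hx with ⟨hg, _⟩ | ⟨hg, _⟩ | ⟨hg, _⟩ | ⟨hg, _⟩ | ⟨hg, _⟩ <;>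
      simp_all
  rw [hM]; rfl

lemma a_eq_chain (d : String) :
    determine_location_type d =
      (if pvG1 d then "landmark"
       else if pvG2 d then "natural"
       else if pvG3 d then "cultural"
       else if pvG4 d then "theme_park"
       else if pvG5 d then "coastal"
       else "general") := rfl

-- ===== VERDICT (by name: the statement is the Claim_ definition above) =====
theorem determine_location_type_spec : Claim_equal_determine_location_type := by
  intro d _
  unfold Spec_determine_location_type
  rw [a_eq_chain]
  cases h1 : pvG1 d
  · cases h2 : pvG2 d
    · cases h3 : pvG3 d
      · cases h4 : pvG4 d
        · cases h5 : pvG5 d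
          · simp [alt_general d h1 h2 h3 h4 h5]
          · simp [alt_coastal d h1 h2 h3 h4 h5]
        · simp [alt_theme_park d h1 h2 h3 h4]
      · simp [alt_cultural d h1 h2 h3]
    · simp [alt_natural d h1 h2]
  · simp [alt_landmark d h1]
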